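-- pv_equiv track=rewrite | github.com/ABHANGKARODE/Python25_Question | DAY_04.PY | word_index
-- ===== SOURCE A (Python) =====
-- def word_index(words):
--     if not words:
--         return 0
--
--     max_length = len(words[0])
--     max_index = 0
--
--     for i in range(1, len(words)):
--         if len(words[i]) > max_length:
--             max_length = len(words[i])
--             max_index = i
--
--     return max_index
-- ===== SOURCE B (Python) =====
-- def word_index(words):
--     if not words:
--         return 0
--     lengths = [len(w) for w in words]
--     return lengths.index(max(lengths))
-- ===== Notes on version B (the rewrite author's own statement) =====
-- stated objective: idiomatic
-- what changed: Replaces A's fused running-max index loop with a materialized lengths table followed by separate max() and .index() passes; both break ties toward the first element, matching A.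
import Mathlib
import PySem

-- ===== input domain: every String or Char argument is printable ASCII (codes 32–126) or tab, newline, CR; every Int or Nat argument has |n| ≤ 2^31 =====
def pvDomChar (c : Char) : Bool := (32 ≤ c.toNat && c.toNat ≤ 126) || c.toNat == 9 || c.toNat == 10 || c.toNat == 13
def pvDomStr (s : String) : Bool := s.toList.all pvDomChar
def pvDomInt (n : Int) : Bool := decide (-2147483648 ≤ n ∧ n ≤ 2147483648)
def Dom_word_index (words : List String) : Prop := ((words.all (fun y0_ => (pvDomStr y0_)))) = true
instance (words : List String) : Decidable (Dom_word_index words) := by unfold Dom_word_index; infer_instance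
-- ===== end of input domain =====

-- B replaces A's fused running-max index loop with a lengths table plus separate max() and first-index passes (same behaviour, idiomatic decomposition).

-- ===== PORT A =====
def word_index (words : List String) : Int :=
  if words = [] then 0
  else
    let st :=
      (PySem.List.pyRange 1 (PySem.List.len words) 1).foldl
        (fun (s : Int × Int) i =>
          if PySem.Str.len (PySem.List.pyGetD words i "") > s.1
          then (PySem.Str.len (PySem.List.pyGetD words i ""), i)
          else s)
        (PySem.Str.len (PySem.List.pyGetD words 0 ""), 0)
    st.2

-- ===== PORT B =====
def word_index_alt (words : List String) : Int :=
  if words = [] then 0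
  else
    let lengths := words.map PySem.Str.len
    match PySem.List.max? lengths (fun y => y) with
    | some m => (((PySem.List.index? lengths m).getD 0 : Nat) : Int)
    | none => 0

-- ===== PRECONDITION & SPEC =====
def Spec_word_index (words : List String) (out : Int) : Prop := out = word_index_alt words
instance (words : List String) (out : Int) : Decidable (Spec_word_index words out) := by unfold Spec_word_index; infer_instance

-- ===== CLAIM (what is proved, stated in full; the proofs are below) =====
def Claim_equal_word_index : Prop := ∀ (words : List String), Dom_word_index words → Spec_word_index words (word_index words)

-- ===== LEMMAS AND PROOFS =====

-- Invariant of A's fused loop over a nonempty list of lengths x :: ls: its final state is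
-- (the maximum, the first index attaining it) — the latter being exactly B's lengths.index(max(lengths)).
lemma wi_main (x : Int) (ls : List Int) :
    (PySem.List.pyRange 1 ((ls.length : Int) + 1) 1).foldl
      (fun (s : Int × Int) i =>
        if PySem.List.pyGetD (x :: ls) i 0 > s.1
        then (PySem.List.pyGetD (x :: ls) i 0, i) else s) (x, 0)
    = (List.foldl max x ls,
       (((PySem.List.index? (x :: ls) (List.foldl max x ls)).getD 0 : Nat) : Int)) := by
  induction ls using List.reverseRecOn with
  | nil =>
    simp [PySem.List.pyRange_one_eq_nil (by norm_num : (1 : Int) ≤ 1)]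
  | append_singleton ls a ih =>
    have hlen : ((ls.length + 1 : Nat) : Int) + 1 = ((ls.length : Int) + 1) + 1 := by push_cast; ring
    rw [List.length_append]
    simp only [List.length_cons, List.length_nil]
    rw [hlen, PySem.List.pyRange_one_succ_right (by omega)]
    rw [List.foldl_append]
    -- on the range 1 ≤ i < len+1 the appended element is invisible
    have hpref :
        (PySem.List.pyRange 1 ((ls.length : Int) + 1) 1).foldl
          (fun (s : Int × Int) i =>
            if PySem.List.pyGetD (x :: (ls ++ [a])) i 0 > s.1
            then (PySem.List.pyGetD (x :: (ls ++ [a])) i 0, i) else s) (x, 0)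
        = (PySem.List.pyRange 1 ((ls.length : Int) + 1) 1).foldl
          (fun (s : Int × Int) i =>
            if PySem.List.pyGetD (x :: ls) i 0 > s.1
            then (PySem.List.pyGetD (x :: ls) i 0, i) else s) (x, 0) := by
      apply PySem.List.foldl_congr_mem
      intro acc i hi
      rw [PySem.List.mem_pyRange_one] at hi
      have h0 : (0:Int) ≤ i := by omega
      have : PySem.List.pyGetD (x :: (ls ++ [a])) i 0 = PySem.List.pyGetD (x :: ls) i 0 := by
        rw [PySem.List.pyGetD_of_nonneg _ _ h0, PySem.List.pyGetD_of_nonneg _ _ h0]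
        have : x :: (ls ++ [a]) = (x :: ls) ++ [a] := by simp
        rw [this, List.getD_append]
        simp only [List.length_cons]
        omega
      rw [this]
    rw [hpref, ih]
    -- the final iteration sees exactly the appended length a
    have hlast : PySem.List.pyGetD (x :: (ls ++ [a])) ((ls.length : Int) + 1) 0 = a := by
      rw [PySem.List.pyGetD_of_nonneg _ _ (by positivity)]
      have : ((ls.length : Int) + 1).toNat = ls.length + 1 := by omega
      rw [this]
      simp [List.getD_eq_getElem?_getD]
    simp only [List.foldl_cons, List.foldl_nil, hlast]
    have hmax := PySem.List.le_foldl_max ls x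
    rw [List.foldl_append]
    by_cases hgt : a > List.foldl max x ls
    · simp only [hgt, if_pos]
      have hm : max (List.foldl max x ls) a = a := max_eq_right (le_of_lt hgt)
      simp only [List.foldl_cons, List.foldl_nil, hm]
      have hnotmem : a ∉ x :: ls := by
        intro hmem
        rcases List.mem_cons.mp hmem with h | h
        · omega
        · have := hmax.2 a h; omega
      have : x :: (ls ++ [a]) = (x :: ls) ++ [a] := by simp
      rw [this, PySem.List.index?_append_singleton_self _ a hnotmem]
      simp
    · simp only [hgt, if_false]
      have hm : max (List.foldl max x ls) a = List.foldl max x ls := max_eq_left (by omega)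
      simp only [List.foldl_cons, List.foldl_nil, hm]
      have hmem : List.foldl max x ls ∈ x :: ls := by
        rcases PySem.List.foldl_max_mem ls x with h | h
        · rw [h]; exact List.mem_cons_self
        · exact List.mem_cons_of_mem _ h
      have : x :: (ls ++ [a]) = (x :: ls) ++ [a] := by simp
      rw [this, PySem.List.index?_append_of_mem _ hmem]

-- ===== VERDICT (by name: the statement is the Claim_ definition above) =====
theorem word_index_spec : Claim_equal_word_index := by
  intro words _
  unfold Spec_word_index word_index word_index_alt
  cases words with
  | nil => simp
  | cons w ws =>
    simp only [reduceCtorEq, if_false]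
    have hbody : ∀ (i : Int),
        PySem.Str.len (PySem.List.pyGetD (w :: ws) i "")
          = PySem.List.pyGetD ((w :: ws).map PySem.Str.len) i 0 := by
      intro i
      have h0 : PySem.Str.len "" = 0 := by decide
      rw [← h0, PySem.List.pyGetD_map]
    have hlen : PySem.List.len (w :: ws) = ((ws.map PySem.Str.len).length : Int) + 1 := by
      simp [PySem.List.len_eq]
    simp only [hbody, hlen, List.map_cons, PySem.List.pyGetD_zero_cons]
    rw [wi_main (PySem.Str.len w) (ws.map PySem.Str.len)]
    rw [PySem.List.max?_id_cons]
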